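-- pv_equiv track=rewrite | github.com/leonahess/zFlux | attacker_name_fetcher.py | extractNamesFromDict
-- ===== SOURCE A (Python) =====
-- def extractNamesFromDict(names_dict):
--     char_str = ";"
--     corp_str = ";"
--     alliance_str = ";"
--
--     for entry in names_dict:
--         if "name" in entry and "character" in entry["category"]:
--             char_str = char_str + entry["name"] + ";"
--         if "name" in entry and "corporation" in entry["category"]:
--             corp_str = corp_str + entry["name"] + ";"
--         if "name" in entry and "alliance" in entry["category"]:
--             alliance_str = alliance_str + entry["name"] + ";"
--
--     if char_str == ";":
--         char_str = ""
--     if corp_str == ";":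
--         corp_str = ""
--     if alliance_str == ";":
--         alliance_str = ""
--
--     names = {"character": char_str, "corporation": corp_str, "alliance": alliance_str}
--
--     return names
-- ===== SOURCE B (Python) =====
-- def extractNamesFromDict(names_dict):
--     names = {}
--     for category in ("character", "corporation", "alliance"):
--         found = [entry["name"] for entry in names_dict
--                  if "name" in entry and category in entry["category"]]
--         names[category] = ";" + ";".join(found) + ";" if found else ""
--     return names
-- ===== Notes on version B (the rewrite author's own statement) =====
-- stated objective: simpler
-- what changed: Replaces A's single pass threading three string accumulators (plus three post-hoc ';'-resets) by one independent filter-and-join pass per category: for each of the three fixed categories, collect the matching names with a comprehension and build ';'+';'.join(names)+';' or '' if none matched.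
import Mathlib
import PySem

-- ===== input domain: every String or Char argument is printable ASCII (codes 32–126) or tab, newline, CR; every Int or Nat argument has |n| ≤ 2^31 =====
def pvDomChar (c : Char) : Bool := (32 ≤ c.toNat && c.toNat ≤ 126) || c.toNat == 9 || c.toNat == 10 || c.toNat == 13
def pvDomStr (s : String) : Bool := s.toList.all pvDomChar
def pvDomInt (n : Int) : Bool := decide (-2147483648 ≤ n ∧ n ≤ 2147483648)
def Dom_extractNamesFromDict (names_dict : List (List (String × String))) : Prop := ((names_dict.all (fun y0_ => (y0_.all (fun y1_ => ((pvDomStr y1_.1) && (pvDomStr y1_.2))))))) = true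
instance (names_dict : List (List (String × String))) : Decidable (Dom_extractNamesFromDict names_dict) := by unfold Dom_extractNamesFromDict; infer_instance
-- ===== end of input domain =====

-- B replaces A's single three-accumulator pass by one independent filter/join pass per
-- category (objective: simpler). Equal return value on Pre_; each dict is a List (String × String)
-- association list, lookup = first match.

-- ===== PORT A =====
-- loop body of A's 'for entry in names_dict'; entry["category"] is ported as getD "" —
-- exact under Pre_ (Python raises KeyError exactly where the lookup is none, excluded by Pre_)
def pvStepA (acc : String × String × String) (entry : List (String × String)) :
    String × String × String :=
  let c := if (entry.lookup "name").isSome &&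
              PySem.Str.isIn "character" ((entry.lookup "category").getD "") then
             acc.1 ++ (entry.lookup "name").getD "" ++ ";" else acc.1
  let k := if (entry.lookup "name").isSome &&
              PySem.Str.isIn "corporation" ((entry.lookup "category").getD "") then
             acc.2.1 ++ (entry.lookup "name").getD "" ++ ";" else acc.2.1
  let a := if (entry.lookup "name").isSome &&
              PySem.Str.isIn "alliance" ((entry.lookup "category").getD "") then
             acc.2.2 ++ (entry.lookup "name").getD "" ++ ";" else acc.2.2
  (c, k, a)

def extractNamesFromDict (names_dict : List (List (String × String))) : List (String × String) :=
  let r := names_dict.foldl pvStepA (";", ";", ";")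
  let char_str := if r.1 = ";" then "" else r.1
  let corp_str := if r.2.1 = ";" then "" else r.2.1
  let alliance_str := if r.2.2 = ";" then "" else r.2.2
  [("character", char_str), ("corporation", corp_str), ("alliance", alliance_str)]

-- ===== PORT B =====
-- filter of Source B's comprehension (same getD "" convention as the A port, exact under Pre_)
def pvMatches (category : String) (entry : List (String × String)) : Bool :=
  (entry.lookup "name").isSome &&
    PySem.Str.isIn category ((entry.lookup "category").getD "")

-- one iteration of Source B's 'for category in (...)' loop: the comprehension, then the joined string
def pvCatStr (names_dict : List (List (String × String))) (category : String) : String :=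
  let found := (names_dict.filter (pvMatches category)).map
                 (fun e => (e.lookup "name").getD "")
  if found.isEmpty then "" else ";" ++ PySem.Str.join ";" found ++ ";"

def extractNamesFromDict_alt (names_dict : List (List (String × String))) :
    List (String × String) :=
  ["character", "corporation", "alliance"].map (fun c => (c, pvCatStr names_dict c))

-- ===== PRECONDITION & SPEC =====
-- Pre_ excludes inputs with an entry that has a "name" key but no "category" key: there
-- Python A raises KeyError on entry["category"] (and Python B raises the same KeyError).
def Pre_extractNamesFromDict (names_dict : List (List (String × String))) : Prop :=
  (names_dict.all (fun e => !(e.lookup "name").isSome || (e.lookup "category").isSome)) = true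
instance (names_dict : List (List (String × String))) : Decidable (Pre_extractNamesFromDict names_dict) := by unfold Pre_extractNamesFromDict; infer_instance

def pvWitness_extractNamesFromDict : (List (List (String × String))) :=
  [[("name", "Bob"), ("category", "character")], [("category", "alliance")]]

def Spec_extractNamesFromDict (names_dict : List (List (String × String))) (out : List (String × String)) : Prop := out = extractNamesFromDict_alt names_dict
instance (names_dict : List (List (String × String))) (out : List (String × String)) : Decidable (Spec_extractNamesFromDict names_dict out) := by unfold Spec_extractNamesFromDict; infer_instance

-- ===== CLAIM (what is proved, stated in full; the proofs are below) =====
def Claim_equal_extractNamesFromDict : Prop := ∀ (names_dict : List (List (String × String))), Dom_extractNamesFromDict names_dict → Pre_extractNamesFromDict names_dict → Spec_extractNamesFromDict names_dict (extractNamesFromDict names_dict)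

-- ===== LEMMAS AND PROOFS =====

-- the name a matching entry contributes
def pvName (entry : List (String × String)) : String := (entry.lookup "name").getD ""

-- S c l = the concatenation "n₁;n₂;…;nₖ;" of the names of the entries of l matching c
def pvS (c : String) : List (List (String × String)) → String
  | [] => ""
  | e :: l => if pvMatches c e then pvName e ++ ";" ++ pvS c l else pvS c l

theorem pvFold_eq (l : List (List (String × String))) :
    ∀ s₁ s₂ s₃ : String, l.foldl pvStepA (s₁, s₂, s₃) =
      (s₁ ++ pvS "character" l, s₂ ++ pvS "corporation" l, s₃ ++ pvS "alliance" l) := by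
  induction l with
  | nil => intro s₁ s₂ s₃; simp [pvS]
  | cons e l ih =>
      intro s₁ s₂ s₃
      simp only [List.foldl_cons, pvStepA, pvS, pvMatches, pvName]
      split_ifs <;> simp [ih, String.append_assoc]

theorem pvS_eq_empty_iff (c : String) (l : List (List (String × String))) :
    pvS c l = "" ↔ l.filter (pvMatches c) = [] := by
  induction l with
  | nil => simp [pvS]
  | cons e l ih =>
      by_cases h : pvMatches c e = true
      · simp only [pvS, h, if_pos, List.filter_cons_of_pos h]
        constructor
        · intro he
          have := congrArg String.toList he
          simp at this
        · intro he; simp at he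
      · simp [pvS, h, List.filter_cons_of_neg, ih]

theorem pvJoin_singleton (p : String) : PySem.Str.join ";" [p] = p := by
  rw [← String.toList_inj]
  simp [PySem.Str.toList_join, PySem.Chars.join_singleton]

theorem pvJoin_cons_cons (p q : String) (rest : List String) :
    PySem.Str.join ";" (p :: q :: rest) = p ++ ";" ++ PySem.Str.join ";" (q :: rest) := by
  rw [← String.toList_inj]
  simp [PySem.Str.toList_join, PySem.Chars.join_cons_cons]

theorem pvJoin_append_semi (c : String) (l : List (List (String × String)))
    (h : l.filter (pvMatches c) ≠ []) :
    PySem.Str.join ";" ((l.filter (pvMatches c)).map pvName) ++ ";" = pvS c l := by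
  induction l with
  | nil => simp at h
  | cons e l ih =>
      by_cases he : pvMatches c e = true
      · rw [List.filter_cons_of_pos he]
        simp only [pvS, he, if_pos, List.map_cons]
        rcases hl : l.filter (pvMatches c) with _ | ⟨f, rest⟩
        · simp only [List.map_nil]
          rw [pvJoin_singleton, (pvS_eq_empty_iff c l).mpr hl]
          simp
        · have ihe := ih (by simp [hl])
          rw [hl] at ihe
          simp only [List.map_cons] at ihe ⊢
          rw [pvJoin_cons_cons, String.append_assoc, ihe]
      · rw [List.filter_cons_of_neg he] at h ⊢
        simp only [pvS, he]
        simpa using ih h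

theorem pvCat_eq (c : String) (l : List (List (String × String))) :
    (if ";" ++ pvS c l = ";" then "" else ";" ++ pvS c l) = pvCatStr l c := by
  unfold pvCatStr
  rcases hl : l.filter (pvMatches c) with _ | ⟨f, rest⟩
  · have hS : pvS c l = "" := (pvS_eq_empty_iff c l).mpr hl
    simp [hS]
  · have hS : pvS c l ≠ "" := by
      intro hS
      rw [pvS_eq_empty_iff] at hS
      simp [hS] at hl
    have hsemi : ¬(";" ++ pvS c l = ";") := by
      intro h
      apply hS
      rw [← String.toList_inj] at h ⊢
      simpa using h
    rw [if_neg hsemi]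
    have hj := pvJoin_append_semi c l (by simp [hl])
    show ";" ++ pvS c l = ";" ++ PySem.Str.join ";" ((f :: rest).map pvName) ++ ";"
    rw [String.append_assoc, ← hl, hj]

-- ===== VERDICT (by name: the statement is the Claim_ definition above) =====
theorem extractNamesFromDict_spec : Claim_equal_extractNamesFromDict := by
  intro names_dict _ _
  unfold Spec_extractNamesFromDict extractNamesFromDict extractNamesFromDict_alt
  rw [pvFold_eq]
  simp only [List.map_cons, List.map_nil, List.cons.injEq, Prod.mk.injEq, and_true, true_and]
  refine ⟨?_, ?_, ?_⟩ <;> exact pvCat_eq _ names_dict
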